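-- pv_equiv track=rewrite | github.com/liranc6/ecg_forecasting | liran_project/utils/util.py | prune_to_same_length
-- ===== SOURCE A (Python) =====
-- def prune_to_same_length(a, b, min_distance=50, max_iter = 4):
--     min_dist_found = False
--     for i in range(len(a)):
--         if len(a) > len(b):
--             if abs(b[0] - a[0]) > abs(b[0] - a[1]):
--                 # assert b[0] - a[0] > min_distance, f"{b[0] - a[0]=}"
--                     a = a[1:]
--
--
--             elif abs(a[-1] - b[-1]) > abs(b[-1] - a[-2]):
--                 # assert a[-1] - b[-1] > min_distance, f"{a[-1] - b[-1]=}"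
--                 a = a[:-1]
--         else:
--             break
--
--     return [a, b]
-- ===== SOURCE B (Python) =====
-- def prune_to_same_length(a, b, min_distance=50, max_iter=4):
--     # Two index pointers into a instead of repeatedly slicing (copying) a.
--     lo, hi = 0, len(a)
--     nb = len(b)
--     while hi - lo > nb:
--         if abs(b[0] - a[lo]) > abs(b[0] - a[lo + 1]):
--             lo += 1
--         elif abs(a[hi - 1] - b[-1]) > abs(b[-1] - a[hi - 2]):
--             hi -= 1
--         else:
--             break
--     return [a[lo:hi], b]
-- ===== Notes on version B (the rewrite author's own statement) =====
-- stated objective: alternative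
-- what changed: B keeps the original list intact and moves two index pointers (lo, hi) inward instead of A's per-iteration list slicing a[1:]/a[:-1] inside a range(len(a)) loop, returning a single final slice; it avoids the copies but was not measurably faster on the generated inputs.
import Mathlib
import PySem

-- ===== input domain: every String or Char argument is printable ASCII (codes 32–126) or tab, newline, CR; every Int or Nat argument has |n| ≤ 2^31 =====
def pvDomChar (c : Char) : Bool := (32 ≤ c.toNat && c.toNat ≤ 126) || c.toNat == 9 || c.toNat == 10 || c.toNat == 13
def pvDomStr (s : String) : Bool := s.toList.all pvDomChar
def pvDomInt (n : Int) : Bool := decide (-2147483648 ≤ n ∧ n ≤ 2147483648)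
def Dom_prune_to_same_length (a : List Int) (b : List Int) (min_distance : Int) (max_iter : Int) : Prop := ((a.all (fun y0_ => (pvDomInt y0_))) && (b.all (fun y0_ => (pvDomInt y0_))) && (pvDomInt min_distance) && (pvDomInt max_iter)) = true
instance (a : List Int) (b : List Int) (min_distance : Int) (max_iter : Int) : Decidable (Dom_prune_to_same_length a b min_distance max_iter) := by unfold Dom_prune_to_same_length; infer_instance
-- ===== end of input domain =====

-- B replaces A's repeated list slicing with two index pointers into the unchanged list a, cutting one final slice.
-- min_distance and max_iter are unused by the Python (only commented-out asserts mention them); they stay as parameters.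

-- ===== PORT A =====
-- the 'for i in range(len(a))' loop, fuel = original len(a); indexing via pyGetD is exact here:
-- under Pre_ every index Python evaluates is in range (len(a) > len(b) ≥ 1 inside the branch).
def pruneA_loop : Nat → List Int → List Int → List Int
  | 0, a, _ => a
  | n+1, a, b =>
    if a.length > b.length then
      if |PySem.List.pyGetD b 0 0 - PySem.List.pyGetD a 0 0| > |PySem.List.pyGetD b 0 0 - PySem.List.pyGetD a 1 0| then
        pruneA_loop n (PySem.List.slice a (some 1) none) b
      else if |PySem.List.pyGetD a (-1) 0 - PySem.List.pyGetD b (-1) 0| > |PySem.List.pyGetD b (-1) 0 - PySem.List.pyGetD a (-2) 0| then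
        pruneA_loop n (PySem.List.slice a none (some (-1))) b
      else
        pruneA_loop n a b
    else a

def prune_to_same_length (a : List Int) (b : List Int) (min_distance : Int) (max_iter : Int) : List (List Int) :=
  [pruneA_loop a.length a b, b]

-- ===== PORT B =====
-- the while loop of Source B; all indices are in range under its invariant, so List.getD is exact
-- (b[-1] is ported as b[len(b)-1], exact for nonempty b).
def pruneB_loop (a b : List Int) (lo hi : Nat) : Nat × Nat :=
  if h : b.length < hi - lo then
    if |b.getD 0 0 - a.getD lo 0| > |b.getD 0 0 - a.getD (lo+1) 0| then
      pruneB_loop a b (lo+1) hi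
    else if |a.getD (hi-1) 0 - b.getD (b.length-1) 0| > |b.getD (b.length-1) 0 - a.getD (hi-2) 0| then
      pruneB_loop a b lo (hi-1)
    else (lo, hi)
  else (lo, hi)
termination_by hi - lo
decreasing_by all_goals omega

def prune_to_same_length_alt (a : List Int) (b : List Int) (min_distance : Int) (max_iter : Int) : List (List Int) :=
  let p := pruneB_loop a b 0 a.length
  [(a.drop p.1).take (p.2 - p.1), b]

-- ===== PRECONDITION & SPEC =====
-- Pre_ excludes exactly the inputs where the Python A raises IndexError: a nonempty with b empty
-- (the loop body then evaluates b[0] on an empty b).  B raises there too.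
def Pre_prune_to_same_length (a : List Int) (b : List Int) (min_distance : Int) (max_iter : Int) : Prop :=
  b ≠ [] ∨ a = []
instance (a : List Int) (b : List Int) (min_distance : Int) (max_iter : Int) : Decidable (Pre_prune_to_same_length a b min_distance max_iter) := by unfold Pre_prune_to_same_length; infer_instance

def pvWitness_prune_to_same_length : List Int × List Int × Int × Int := ([1, 2, 100], [2], 50, 4)

def Spec_prune_to_same_length (a : List Int) (b : List Int) (min_distance : Int) (max_iter : Int) (out : List (List Int)) : Prop := out = prune_to_same_length_alt a b min_distance max_iter
instance (a : List Int) (b : List Int) (min_distance : Int) (max_iter : Int) (out : List (List Int)) : Decidable (Spec_prune_to_same_length a b min_distance max_iter out) := by unfold Spec_prune_to_same_length; infer_instance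

-- ===== CLAIM (what is proved, stated in full; the proofs are below) =====
def Claim_equal_prune_to_same_length : Prop := ∀ (a : List Int) (b : List Int) (min_distance : Int) (max_iter : Int), Dom_prune_to_same_length a b min_distance max_iter → Pre_prune_to_same_length a b min_distance max_iter → Spec_prune_to_same_length a b min_distance max_iter (prune_to_same_length a b min_distance max_iter)

-- ===== LEMMAS AND PROOFS =====

-- once neither trimming condition holds, A's loop keeps the list unchanged for all remaining iterations
lemma pruneA_loop_stuck (n : Nat) (a b : List Int)
    (h1 : ¬ (|PySem.List.pyGetD b 0 0 - PySem.List.pyGetD a 0 0| > |PySem.List.pyGetD b 0 0 - PySem.List.pyGetD a 1 0|))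
    (h2 : ¬ (|PySem.List.pyGetD a (-1) 0 - PySem.List.pyGetD b (-1) 0| > |PySem.List.pyGetD b (-1) 0 - PySem.List.pyGetD a (-2) 0|)) :
    pruneA_loop n a b = a := by
  induction n with
  | zero => rfl
  | succ n ih => simp [pruneA_loop, h1, h2, ih]

-- the current list of A's loop is the segment a[lo:hi]; its indexing reduces to indexing a
lemma seg_getD (a : List Int) (lo hi i : Nat) (h : lo + i < hi) (hhi : hi ≤ a.length) :
    ((a.drop lo).take (hi - lo)).getD i 0 = a.getD (lo + i) 0 := by
  rw [List.getD_eq_getElem?_getD, List.getD_eq_getElem?_getD,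
    List.getElem?_take_of_lt (by omega), List.getElem?_drop]

lemma seg_len (a : List Int) (lo hi : Nat) (_hhi : hi ≤ a.length) :
    ((a.drop lo).take (hi - lo)).length = hi - lo := by
  simp; omega

lemma seg_tail (a : List Int) (lo hi : Nat) :
    ((a.drop lo).take (hi - lo)).tail = (a.drop (lo+1)).take (hi - (lo+1)) := by
  rw [← List.drop_one, List.drop_take, List.drop_drop]
  congr 1

lemma seg_dropLast (a : List Int) (lo hi : Nat) (hhi : hi ≤ a.length) :
    ((a.drop lo).take (hi - lo)).dropLast = (a.drop lo).take (hi - 1 - lo) := by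
  rw [List.dropLast_eq_take, List.take_take]
  congr 1
  simp
  omega

-- the core simulation: A's loop on the segment a[lo:hi] equals the segment cut out by B's two pointers
lemma main_prune (a b : List Int) (hb : b ≠ []) :
    ∀ (fuel lo hi : Nat), lo ≤ hi → hi ≤ a.length → hi - lo ≤ fuel + b.length →
    pruneA_loop fuel ((a.drop lo).take (hi - lo)) b =
      (a.drop (pruneB_loop a b lo hi).1).take ((pruneB_loop a b lo hi).2 - (pruneB_loop a b lo hi).1) := by
  intro fuel
  induction fuel with
  | zero =>
    intro lo hi h1 h2 h3
    rw [pruneB_loop, dif_neg (by omega)]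
    rfl
  | succ n ih =>
    intro lo hi h1 h2 h3
    have hbl : 1 ≤ b.length := List.length_pos_of_ne_nil hb
    have hlen := seg_len a lo hi h2
    by_cases hg : b.length < hi - lo
    · have eb0 : PySem.List.pyGetD b 0 0 = b.getD 0 0 := PySem.List.pyGetD_ofNat' b 0 0
      have ebn : PySem.List.pyGetD b (-1) 0 = b.getD (b.length - 1) 0 := by
        rw [PySem.List.pyGetD_neg_ofNat b 1 0 (by omega) (by omega),
          List.getD_eq_getElem b 0 (by omega)]
      have e0 : PySem.List.pyGetD ((a.drop lo).take (hi - lo)) 0 0 = a.getD lo 0 := by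
        rw [PySem.List.pyGetD_ofNat' _ 0 0, seg_getD a lo hi 0 (by omega) h2, Nat.add_zero]
      have e1 : PySem.List.pyGetD ((a.drop lo).take (hi - lo)) 1 0 = a.getD (lo + 1) 0 := by
        rw [PySem.List.pyGetD_ofNat' _ 1 0, seg_getD a lo hi 1 (by omega) h2]
      have em1 : PySem.List.pyGetD ((a.drop lo).take (hi - lo)) (-1) 0 = a.getD (hi - 1) 0 := by
        rw [PySem.List.pyGetD_neg_ofNat _ 1 0 (by omega) (by omega),
          ← List.getD_eq_getElem _ 0, hlen, seg_getD a lo hi (hi - lo - 1) (by omega) h2]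
        congr 1
        omega
      have em2 : PySem.List.pyGetD ((a.drop lo).take (hi - lo)) (-2) 0 = a.getD (hi - 2) 0 := by
        rw [PySem.List.pyGetD_neg_ofNat _ 2 0 (by omega) (by omega),
          ← List.getD_eq_getElem _ 0, hlen, seg_getD a lo hi (hi - lo - 2) (by omega) h2]
        congr 1
        omega
      rw [pruneB_loop, dif_pos hg]
      simp only [pruneA_loop, if_pos (by omega : ((a.drop lo).take (hi - lo)).length > b.length),
        eb0, ebn, e0, e1, em1, em2]
      by_cases hc1 : |b.getD 0 0 - a.getD lo 0| > |b.getD 0 0 - a.getD (lo + 1) 0|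
      · rw [if_pos hc1, if_pos hc1, PySem.List.slice_from_one, seg_tail]
        exact ih (lo+1) hi (by omega) h2 (by omega)
      · rw [if_neg hc1, if_neg hc1]
        by_cases hc2 : |a.getD (hi-1) 0 - b.getD (b.length - 1) 0| > |b.getD (b.length - 1) 0 - a.getD (hi-2) 0|
        · rw [if_pos hc2, if_pos hc2, PySem.List.slice_to_neg_one, seg_dropLast a lo hi h2]
          exact ih lo (hi-1) (by omega) (by omega) (by omega)
        · rw [if_neg hc2, if_neg hc2]
          have hA1 : ¬ (|PySem.List.pyGetD b 0 0 - PySem.List.pyGetD ((a.drop lo).take (hi - lo)) 0 0| >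
              |PySem.List.pyGetD b 0 0 - PySem.List.pyGetD ((a.drop lo).take (hi - lo)) 1 0|) := by
            rw [eb0, e0, e1]; exact hc1
          have hA2 : ¬ (|PySem.List.pyGetD ((a.drop lo).take (hi - lo)) (-1) 0 - PySem.List.pyGetD b (-1) 0| >
              |PySem.List.pyGetD b (-1) 0 - PySem.List.pyGetD ((a.drop lo).take (hi - lo)) (-2) 0|) := by
            rw [ebn, em1, em2]; exact hc2
          exact pruneA_loop_stuck n _ b hA1 hA2
    · rw [pruneB_loop, dif_neg hg]
      simp only [pruneA_loop, if_neg (by omega : ¬ ((a.drop lo).take (hi - lo)).length > b.length)]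


theorem prune_to_same_length_spec : Claim_equal_prune_to_same_length := by
  intro a b md mi hdom hpre
  unfold Spec_prune_to_same_length prune_to_same_length prune_to_same_length_alt
  rcases hpre with hb | ha
  · have := main_prune a b hb a.length 0 a.length (by omega) le_rfl (by omega)
    simp only [List.drop_zero, Nat.sub_zero, List.take_length] at this
    simp [this]
  · subst ha
    simp [pruneA_loop, pruneB_loop]
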